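-- pv_equiv track=rewrite | github.com/r-ripley/CodingProjects | CodeWarsSolutions/sixKyu/CountTheSmileyFaces.py | count_smileys
-- ===== SOURCE A (Python) =====
-- def count_smileys(arr):
--     count = 0
--
--     # iterate through array and count each possible smiley
--     for item in arr:
--         if len(item) == 2:
--             if (item[0] == ':' or item[0] == ';') and (item[1] == ')' or item[1] == 'D'):
--                 count += 1
--
--         elif len(item) == 3:
--             if (item[0] == ':' or item[0] == ';') and (item[1] == '-' or item[1] == '~') and (item[2] == ')' or item[2] == 'D'):
--                 count += 1
--
--     return count
-- ===== SOURCE B (Python) =====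
-- import re
--
-- _SMILEY = re.compile(r'[:;][-~]?[)D]')
--
-- def count_smileys(arr):
--     return sum(1 for s in arr if _SMILEY.fullmatch(s))
-- ===== Notes on version B (the rewrite author's own statement) =====
-- stated objective: idiomatic
-- what changed: Replaces the explicit loop with len==2/len==3 branching and per-index character comparisons by a single compiled regular expression [:;][-~]?[)D] full-matched against each element inside a sum over a generator.
import Mathlib
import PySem

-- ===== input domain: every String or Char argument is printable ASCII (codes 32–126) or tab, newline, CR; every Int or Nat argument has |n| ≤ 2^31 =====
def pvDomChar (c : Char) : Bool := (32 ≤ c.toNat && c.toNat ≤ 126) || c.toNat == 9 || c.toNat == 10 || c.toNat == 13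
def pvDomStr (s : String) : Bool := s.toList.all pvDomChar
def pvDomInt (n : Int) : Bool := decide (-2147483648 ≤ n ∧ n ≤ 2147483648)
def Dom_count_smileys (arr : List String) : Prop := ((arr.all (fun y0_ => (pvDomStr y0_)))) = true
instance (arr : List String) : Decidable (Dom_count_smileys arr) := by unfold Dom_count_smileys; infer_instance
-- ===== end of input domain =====

-- B replaces A's explicit length-branching loop with a regex fullmatch ([:;][-~]?[)D]) counted over the list (idiomatic; same cost).


-- ===== PORT A =====
-- Explicit loop: fold over arr, with the same len==2 / len==3 branches and per-index
-- character comparisons as A (indexing is under the length guard, so List.getD is exact).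
def pvAStep (count : Int) (item : String) : Int :=
  let cs := item.toList
  if cs.length = 2 then
    if (cs.getD 0 ' ' = ':' ∨ cs.getD 0 ' ' = ';') ∧ (cs.getD 1 ' ' = ')' ∨ cs.getD 1 ' ' = 'D') then
      count + 1
    else count
  else if cs.length = 3 then
    if (cs.getD 0 ' ' = ':' ∨ cs.getD 0 ' ' = ';') ∧ (cs.getD 1 ' ' = '-' ∨ cs.getD 1 ' ' = '~')
        ∧ (cs.getD 2 ' ' = ')' ∨ cs.getD 2 ' ' = 'D') then
      count + 1
    else count
  else count

def count_smileys (arr : List String) : Int :=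
  arr.foldl pvAStep 0

-- ===== PORT B =====
-- re.fullmatch of the compiled pattern [:;][-~]?[)D]: ported exactly as a pattern match
-- on the character list (the regex accepts precisely these two shapes).
def pvSmileyFullmatch (s : String) : Bool :=
  match s.toList with
  | [e, m]    => (e == ':' || e == ';') && (m == ')' || m == 'D')
  | [e, d, m] => (e == ':' || e == ';') && (d == '-' || d == '~') && (m == ')' || m == 'D')
  | _         => false

def count_smileys_alt (arr : List String) : Int :=
  ((arr.filter (fun s => pvSmileyFullmatch s)).map (fun _ => (1 : Int))).sum

-- ===== PRECONDITION & SPEC =====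
def Spec_count_smileys (arr : List String) (out : Int) : Prop := out = count_smileys_alt arr
instance (arr : List String) (out : Int) : Decidable (Spec_count_smileys arr out) := by unfold Spec_count_smileys; infer_instance

-- ===== CLAIM (what is proved, stated in full; the proofs are below) =====
def Claim_equal_count_smileys : Prop := ∀ (arr : List String), Dom_count_smileys arr → Spec_count_smileys arr (count_smileys arr)

-- ===== LEMMAS AND PROOFS =====
theorem pvAStep_eq (c : Int) (s : String) :
    pvAStep c s = c + (if pvSmileyFullmatch s then 1 else 0) := by
  unfold pvAStep pvSmileyFullmatch
  rcases h : s.toList with _ | ⟨a, _ | ⟨b, _ | ⟨e, _ | ⟨d, t⟩⟩⟩⟩ <;>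
    simp <;> split_ifs <;> simp_all

theorem pv_foldl_eq (l : List String) (c : Int) :
    l.foldl pvAStep c = c + count_smileys_alt l := by
  induction l generalizing c with
  | nil => simp [count_smileys_alt]
  | cons x xs ih =>
    simp only [List.foldl_cons, ih, pvAStep_eq, count_smileys_alt, List.filter_cons]
    split_ifs <;> simp <;> try ring

-- ===== VERDICT (by name: the statement is the Claim_ definition above) =====
theorem count_smileys_spec : Claim_equal_count_smileys := by
  intro arr _
  unfold Spec_count_smileys count_smileys
  rw [pv_foldl_eq]
  ring
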